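-- pv_equiv track=rewrite | github.com/Andreachurchwell/JTC_AISE_FALL_2025 | practice/9-8-practice.py | longest_word_reversed
-- ===== SOURCE A (Python) =====
-- def longest_word_reversed(sentence):
--     words = sentence.split()
--     max_length = 0
--     longest_words = []
--
--     for word in words:
--         if len(word) > max_length:
--             max_length = len(word)      #  update max length
--             longest_words = [word]      # reset list with this word
--         elif len(word) == max_length:
--             longest_words.append(word)  # add ties
--
--     # now reverse each longest word
--     reversed_words = []
--     for word in longest_words:
--         rev = ""
--         for ch in word:
--             rev = ch + rev
--         reversed_words.append(rev)
--
--     return reversed_words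
-- ===== SOURCE B (Python) =====
-- def longest_word_reversed(sentence):
--     words = sentence.split()
--     if not words:
--         return []
--     m = max(len(w) for w in words)
--     return [w[::-1] for w in words if len(w) == m]
-- ===== Notes on version B (the rewrite author's own statement) =====
-- stated objective: simpler
-- what changed: Replaces A's single-pass running-max-with-reset accumulation and char-by-char string-prepend reversal with a two-pass shape: compute the global max word length once, then one filtering comprehension using slice reversal.
import Mathlib
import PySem

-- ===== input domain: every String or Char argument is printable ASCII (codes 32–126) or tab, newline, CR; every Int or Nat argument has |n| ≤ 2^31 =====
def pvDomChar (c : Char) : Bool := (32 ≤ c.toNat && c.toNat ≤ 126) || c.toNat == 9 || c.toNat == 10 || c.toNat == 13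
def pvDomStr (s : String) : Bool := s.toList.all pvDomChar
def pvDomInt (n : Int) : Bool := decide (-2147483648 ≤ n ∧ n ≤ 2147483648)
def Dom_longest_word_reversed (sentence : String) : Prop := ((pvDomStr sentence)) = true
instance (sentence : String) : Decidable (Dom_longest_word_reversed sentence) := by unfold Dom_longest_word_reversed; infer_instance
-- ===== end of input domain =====

-- B changes structure only: global-max pass + one filtering comprehension with slice reversal,
-- instead of A's running-max-with-reset accumulation and char-prepend reversal (objective: simpler).


-- B changes structure only: global-max pass + one filtering comprehension with slice reversal,
-- instead of A's running-max-with-reset accumulation and char-prepend reversal (objective: simpler).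

-- ===== PORT A =====
def lwrStep (st : Int × List String) (word : String) : Int × List String :=
  if PySem.Str.len word > st.1 then (PySem.Str.len word, [word])
  else if PySem.Str.len word = st.1 then (st.1, st.2 ++ [word])
  else st

-- rev = "" ; for ch in word: rev = ch + rev
def lwrRev (word : String) : String :=
  word.toList.foldl (fun rev ch => String.ofList (ch :: rev.toList)) (String.ofList [])

def longest_word_reversed (sentence : String) : List String :=
  let words := PySem.Str.split₀ sentence
  let st := words.foldl lwrStep (0, [])
  st.2.foldl (fun acc word => acc ++ [lwrRev word]) []

-- ===== PORT B =====
def longest_word_reversed_alt (sentence : String) : List String :=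
  let words := PySem.Str.split₀ sentence
  match words with
  | [] => []
  | _ =>
    match PySem.List.max? (words.map (fun w => PySem.Str.len w)) (fun x => x) with
    | none => []
    | some m =>
      (words.filter (fun w => decide (PySem.Str.len w = m))).map
        (fun w => (PySem.Str.slice? w none none (-1)).getD "")

-- ===== PRECONDITION & SPEC =====
def Spec_longest_word_reversed (sentence : String) (out : List String) : Prop := out = longest_word_reversed_alt sentence
instance (sentence : String) (out : List String) : Decidable (Spec_longest_word_reversed sentence out) := by unfold Spec_longest_word_reversed; infer_instance

-- ===== CLAIM (what is proved, stated in full; the proofs are below) =====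
def Claim_equal_longest_word_reversed : Prop := ∀ (sentence : String), Dom_longest_word_reversed sentence → Spec_longest_word_reversed sentence (longest_word_reversed sentence)

-- ===== LEMMAS AND PROOFS =====

theorem lwrRev_eq (word : String) : lwrRev word = String.ofList word.toList.reverse := by
  unfold lwrRev
  suffices h : ∀ (l : List Char) (r : List Char),
      l.foldl (fun rev ch => String.ofList (ch :: rev.toList)) (String.ofList r)
        = String.ofList (l.reverse ++ r) by
    simpa using h word.toList []
  intro l
  induction l with
  | nil => intro r; simp
  | cons c t ih => intro r; simp [List.foldl, ih (c :: r)]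

theorem foldl_append_map {α β : Type} (f : α → β) (xs : List α) (acc : List β) :
    xs.foldl (fun acc w => acc ++ [f w]) acc = acc ++ xs.map f := by
  induction xs generalizing acc with
  | nil => simp
  | cons x t ih => simp [List.foldl, ih]

-- the running max-with-reset loop, characterised against the final maximum
theorem lwrStep_foldl (ws : List String) (m : Int) (L : List String) :
    ws.foldl lwrStep (m, L)
      = (ws.foldl (fun a w => max a (PySem.Str.len w)) m,
         (if ws.foldl (fun a w => max a (PySem.Str.len w)) m = m then L else [])
           ++ ws.filter (fun w => decide (PySem.Str.len w = ws.foldl (fun a w => max a (PySem.Str.len w)) m))) := by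
  induction ws generalizing m L with
  | nil => simp
  | cons w t ih =>
    simp only [List.foldl_cons]
    have hle := (PySem.List.le_foldl_max_int t (fun w => PySem.Str.len w) (max m (PySem.Str.len w))).1
    by_cases h1 : PySem.Str.len w > m
    · have hm : max m (PySem.Str.len w) = PySem.Str.len w := max_eq_right h1.le
      have hstep : lwrStep (m, L) w = (PySem.Str.len w, [w]) := by
        simp only [lwrStep]; rw [if_pos h1]
      rw [hstep, ih]
      simp only [hm] at hle ⊢
      have hKm' : ¬ (t.foldl (fun a w => max a (PySem.Str.len w)) (PySem.Str.len w) = m) := by omega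
      rw [if_neg hKm', List.filter_cons]
      by_cases h2 : PySem.Str.len w = t.foldl (fun a w => max a (PySem.Str.len w)) (PySem.Str.len w)
      · have hcp : decide (PySem.Str.len w = t.foldl (fun a w => max a (PySem.Str.len w)) (PySem.Str.len w)) = true :=
          decide_eq_true h2
        rw [if_pos h2.symm, if_pos hcp]
        rfl
      · have hcn : ¬ (decide (PySem.Str.len w = t.foldl (fun a w => max a (PySem.Str.len w)) (PySem.Str.len w)) = true) := by
          simpa using h2
        rw [if_neg (fun h => h2 h.symm), if_neg hcn]
    · have hm : max m (PySem.Str.len w) = m := max_eq_left (by omega)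
      simp only [hm] at hle ⊢
      rw [List.filter_cons]
      by_cases h2 : PySem.Str.len w = m
      · have hstep : lwrStep (m, L) w = (m, L ++ [w]) := by
          simp only [lwrStep]; rw [if_neg h1, if_pos h2]
        rw [hstep, ih]
        by_cases h3 : t.foldl (fun a w => max a (PySem.Str.len w)) m = m
        · have hcp : decide (PySem.Str.len w = t.foldl (fun a w => max a (PySem.Str.len w)) m) = true :=
            decide_eq_true (h2.trans h3.symm)
          rw [if_pos h3, if_pos h3, if_pos hcp, List.append_assoc]
          rfl
        · have hne : ¬ (PySem.Str.len w = t.foldl (fun a w => max a (PySem.Str.len w)) m) := by omega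
          have hcn : ¬ (decide (PySem.Str.len w = t.foldl (fun a w => max a (PySem.Str.len w)) m) = true) := by
            simpa using hne
          rw [if_neg h3, if_neg h3, if_neg hcn]
      · have hstep : lwrStep (m, L) w = (m, L) := by
          simp only [lwrStep]; rw [if_neg h1, if_neg h2]
        rw [hstep, ih]
        have hne : ¬ (PySem.Str.len w = t.foldl (fun a w => max a (PySem.Str.len w)) m) := by omega
        have hcn : ¬ (decide (PySem.Str.len w = t.foldl (fun a w => max a (PySem.Str.len w)) m) = true) := by
          simpa using hne
        rw [if_neg hcn]

theorem len_nonneg (w : String) : 0 ≤ PySem.Str.len w := by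
  simp [PySem.Str.len]

theorem foldl_max_map (ws : List String) (a : Int) :
    ws.foldl (fun a w => max a (PySem.Str.len w)) a = (ws.map (fun w => PySem.Str.len w)).foldl max a := by
  induction ws generalizing a with
  | nil => rfl
  | cons w t ih => rw [List.foldl_cons, List.map_cons, List.foldl_cons]; exact ih _

-- ===== VERDICT (by name: the statement is the Claim_ definition above) =====
theorem longest_word_reversed_spec : Claim_equal_longest_word_reversed := by
  intro sentence _
  unfold Spec_longest_word_reversed longest_word_reversed longest_word_reversed_alt
  cases hws : PySem.Str.split₀ sentence with
  | nil => simp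
  | cons w t =>
    simp only
    rw [lwrStep_foldl]
    rw [List.map_cons, PySem.List.max?_id_cons]
    have hM : (w :: t).foldl (fun a w => max a (PySem.Str.len w)) 0
        = (t.map (fun w => PySem.Str.len w)).foldl max (PySem.Str.len w) := by
      rw [List.foldl_cons, foldl_max_map, max_eq_right (len_nonneg w)]
    simp only [hM, foldl_append_map, List.nil_append]
    split_ifs with h0 <;>
      · congr 1
        funext wd
        simp [lwrRev_eq, PySem.Str.slice?_none_none_neg_one]
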